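-- pv_equiv track=rewrite | github.com/Erik-Tiedt/AutoCharter | stream_parser/parser.py | make_stream_replacements
-- ===== SOURCE A (Python) =====
-- def make_stream_replacements(stream, replacement):
--     measures_list = stream.split(',')
--     new_measures = []
--     next_start = 0
--     for pattern in measures_list:
--         end = next_start + len(pattern)
--         new_measures.append(replacement[next_start:end])
--         next_start = end
--
--     return '\n,\n'.join(new_measures)
-- ===== SOURCE B (Python) =====
-- def make_stream_replacements(stream, replacement):
--     head, sep, tail = stream.partition(',')
--     chunk = replacement[:len(head)]
--     if not sep:
--         return chunk
--     return chunk + '\n,\n' + make_stream_replacements(tail, replacement[len(head):])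
-- ===== Notes on version B (the rewrite author's own statement) =====
-- stated objective: alternative
-- what changed: Replaces the split-then-accumulate loop (threading a running offset and an output list) with a direct recursive decomposition: partition the stream at the first comma, take the matching prefix of the replacement, and recurse on the remainders of both strings.
import Mathlib
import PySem

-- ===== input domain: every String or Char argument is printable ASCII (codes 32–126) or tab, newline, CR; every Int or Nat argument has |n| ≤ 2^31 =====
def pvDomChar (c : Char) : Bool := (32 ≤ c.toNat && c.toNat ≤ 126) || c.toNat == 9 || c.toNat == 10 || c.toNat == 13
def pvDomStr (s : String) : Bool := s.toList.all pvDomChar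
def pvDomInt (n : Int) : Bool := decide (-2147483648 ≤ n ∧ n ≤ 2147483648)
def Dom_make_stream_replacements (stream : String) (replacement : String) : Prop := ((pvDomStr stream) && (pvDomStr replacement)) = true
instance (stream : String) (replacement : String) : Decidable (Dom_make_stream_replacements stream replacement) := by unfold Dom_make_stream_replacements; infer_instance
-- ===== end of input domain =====

-- B recurses on the stream via str.partition instead of threading a running offset
-- through a split-and-accumulate loop (objective: alternative).

-- ===== PORT A =====
def make_stream_replacements (stream : String) (replacement : String) : String :=
  let measures_list := PySem.Chars.splitOn stream.toList [',']
  let res := measures_list.foldl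
    (fun (st : Int × List (List Char)) pattern =>
      let e : Int := st.1 + (pattern.length : Int)
      (e, st.2 ++ [PySem.List.slice replacement.toList (some st.1) (some e)]))
    ((0 : Int), ([] : List (List Char)))
  String.ofList (PySem.Chars.join ("\n,\n".toList) res.2)

-- ===== PORT B =====
-- str.partition(',') is ported by hand via takeWhile/dropWhile: for a one-character
-- separator, `head` is the part before the first ',' and `dropWhile` is either []
-- (separator absent) or ',' :: tail; this is exact.
def altRec (s r : List Char) : List Char :=
  let head := s.takeWhile (fun c => c ≠ ',')
  let chunk := PySem.List.slice r none (some (head.length : Int))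
  match h : s.dropWhile (fun c => c ≠ ',') with
  | [] => chunk
  | _ :: tail =>
      chunk ++ '\n' :: ',' :: '\n' ::
        altRec tail (PySem.List.slice r (some (head.length : Int)) none)
termination_by s.length
decreasing_by
  have hsub := (List.dropWhile_sublist (l := s) (p := fun c => c ≠ ',')).length_le
  rw [h] at hsub
  simp at hsub
  omega

def make_stream_replacements_alt (stream : String) (replacement : String) : String :=
  String.ofList (altRec stream.toList replacement.toList)

-- ===== PRECONDITION & SPEC =====
def Spec_make_stream_replacements (stream : String) (replacement : String) (out : String) : Prop := out = make_stream_replacements_alt stream replacement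
instance (stream : String) (replacement : String) (out : String) : Decidable (Spec_make_stream_replacements stream replacement out) := by unfold Spec_make_stream_replacements; infer_instance

-- ===== CLAIM (what is proved, stated in full; the proofs are below) =====
def Claim_equal_make_stream_replacements : Prop := ∀ (stream : String) (replacement : String), Dom_make_stream_replacements stream replacement → Spec_make_stream_replacements stream replacement (make_stream_replacements stream replacement)

-- ===== LEMMAS AND PROOFS =====

-- split on a single comma, structurally
def mySplit : List Char → List (List Char)
  | [] => [[]]
  | c :: cs => if c = ',' then [] :: mySplit cs else (mySplit cs).modifyHead (fun h => c :: h)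

-- the chunk list A builds, from offset `s`
def chunksFrom (r : List Char) : List (List Char) → Int → List (List Char)
  | [], _ => []
  | p :: ps, s => PySem.List.slice r (some s) (some (s + (p.length : Int))) :: chunksFrom r ps (s + (p.length : Int))

lemma mySplit_ne_nil (cs : List Char) : mySplit cs ≠ [] := by
  induction cs with
  | nil => simp [mySplit]
  | cons c cs ih =>
    unfold mySplit
    split_ifs
    · simp
    · cases h : mySplit cs with
      | nil => exact absurd h ih
      | cons p ps => simp

lemma splitOn_go_spec (fuel : Nat) : ∀ (l cur : List Char) (acc : List (List Char)), l.length < fuel →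
    PySem.Chars.splitOn.go [','] fuel l cur acc
      = acc.reverse ++ (mySplit l).modifyHead (fun h => cur.reverse ++ h) := by
  induction fuel with
  | zero => intro l cur acc h; omega
  | succ fuel ih =>
    intro l cur acc h
    cases l with
    | nil =>
      simp [PySem.Chars.splitOn.go, mySplit]
    | cons c rest =>
      by_cases hc : c = ','
      · subst hc
        rw [PySem.Chars.splitOn.go]
        simp only [List.isPrefixOf, BEq.rfl, Bool.and_self, if_true]
        rw [show List.drop [','].length (',' :: rest) = rest from rfl]
        rw [ih rest [] ((cur.reverse) :: acc) (by simp at h ⊢; omega)]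
        cases hsp : mySplit rest with
        | nil => exact absurd hsp (mySplit_ne_nil rest)
        | cons p ps => simp [mySplit, hsp]
      · rw [PySem.Chars.splitOn.go]
        have hpre : [','].isPrefixOf (c :: rest) = false := by
          simp [List.isPrefixOf]; exact fun hg => absurd hg.symm hc
        rw [hpre]
        simp only [Bool.false_eq_true, if_false]
        rw [ih rest (c :: cur) acc (by simp at h ⊢; omega)]
        cases hsp : mySplit rest with
        | nil => exact absurd hsp (mySplit_ne_nil rest)
        | cons p ps => simp [mySplit, hsp, hc]

lemma splitOn_comma (cs : List Char) : PySem.Chars.splitOn cs [','] = mySplit cs := by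
  unfold PySem.Chars.splitOn
  rw [splitOn_go_spec (cs.length + 1) cs [] [] (by omega)]
  cases hsp : mySplit cs with
  | nil => exact absurd hsp (mySplit_ne_nil cs)
  | cons p ps => simp

lemma foldA (r : List Char) : ∀ (parts : List (List Char)) (s : Int) (acc : List (List Char)),
    (parts.foldl
      (fun (st : Int × List (List Char)) pattern =>
        let e : Int := st.1 + (pattern.length : Int)
        (e, st.2 ++ [PySem.List.slice r (some st.1) (some e)]))
      (s, acc)).2 = acc ++ chunksFrom r parts s := by
  intro parts
  induction parts with
  | nil => intro s acc; simp [chunksFrom]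
  | cons p ps ih =>
    intro s acc
    simp only [List.foldl_cons]
    rw [ih]
    simp [chunksFrom]

-- stream with no comma splits into itself alone
lemma mySplit_no_comma (s : List Char) (h : ∀ c ∈ s, c ≠ ',') : mySplit s = [s] := by
  induction s with
  | nil => simp [mySplit]
  | cons c cs ih =>
    have hc : c ≠ ',' := h c (by simp)
    simp only [mySplit, if_neg hc]
    rw [ih (fun x hx => h x (by simp [hx]))]
    simp

-- splitting at the first comma
lemma mySplit_split (head tail : List Char) (h : ∀ c ∈ head, c ≠ ',') :
    mySplit (head ++ ',' :: tail) = head :: mySplit tail := by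
  induction head with
  | nil => simp [mySplit]
  | cons c cs ih =>
    have hc : c ≠ ',' := h c (by simp)
    simp only [List.cons_append, mySplit, if_neg hc]
    rw [ih (fun x hx => h x (by simp [hx]))]
    simp

-- chunks laid out from a nonnegative offset are chunks of the dropped replacement
lemma chunksFrom_drop (r : List Char) (a : Nat) : ∀ (parts : List (List Char)) (s : Nat),
    chunksFrom r parts (((a + s : Nat) : Int)) = chunksFrom (r.drop a) parts (s : Int) := by
  intro parts
  induction parts with
  | nil => intro s; simp [chunksFrom]
  | cons p ps ih =>
    intro s
    simp only [chunksFrom, List.cons.injEq]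
    refine ⟨?_, ?_⟩
    · rw [show ((a + s : Nat) : Int) + (p.length : Int) = (((a + s + p.length : Nat)) : Int) by push_cast; ring,
        show ((s : Int) + (p.length : Int)) = ((s + p.length : Nat) : Int) by push_cast; ring]
      rw [PySem.List.slice_natCast, PySem.List.slice_natCast]
      rw [List.drop_drop]
      have h1 : a + s + p.length - (a + s) = s + p.length - s := by omega
      rw [h1]
    · rw [show ((a + s : Nat) : Int) + (p.length : Int) = (((a + (s + p.length) : Nat)) : Int) by push_cast; ring,
        show ((s : Int) + (p.length : Int)) = ((s + p.length : Nat) : Int) by push_cast; ring]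
      exact ih (s + p.length)

-- the head of a nonempty dropWhile fails the predicate
lemma dropWhile_head_false {p : Char → Bool} : ∀ (l : List Char) (c : Char) (tail : List Char),
    l.dropWhile p = c :: tail → p c = false := by
  intro l
  induction l with
  | nil => intro c tail h; simp [List.dropWhile] at h
  | cons x xs ih =>
    intro c tail h
    rw [List.dropWhile_cons] at h
    by_cases hp : p x = true
    · rw [if_pos hp] at h; exact ih c tail h
    · rw [if_neg hp] at h
      cases h
      simpa using hp

-- the main bridge: A's join-of-chunks equals B's recursion
lemma main_bridge (n : Nat) : ∀ (s r : List Char), s.length ≤ n →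
    PySem.Chars.join ('\n' :: ',' :: '\n' :: []) (chunksFrom r (mySplit s) 0) = altRec s r := by
  induction n with
  | zero =>
    intro s r h
    have hs : s = [] := List.length_eq_zero_iff.mp (by omega)
    subst hs
    rw [altRec]
    simp [mySplit, chunksFrom, PySem.Chars.join_singleton]
  | succ n ih =>
    intro s r h
    rw [altRec]
    have hdecomp := List.takeWhile_append_dropWhile (p := fun c => decide (c ≠ ',')) (l := s)
    cases hdw : s.dropWhile (fun c => decide (c ≠ ',')) with
    | nil =>
      have hs : s.takeWhile (fun c => decide (c ≠ ',')) = s := by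
        have h' := hdecomp
        rw [hdw, List.append_nil] at h'
        exact h'
      have hnoc : ∀ c ∈ s, c ≠ ',' := by
        intro c hc
        have := List.mem_takeWhile_imp (l := s) (p := fun c => decide (c ≠ ',')) (by rw [hs]; exact hc)
        simpa using this
      rw [mySplit_no_comma s hnoc]
      simp only [chunksFrom, hs]
      rw [PySem.Chars.join_singleton]
      simp
    | cons c tail =>
      have hc : c = ',' := by
        have := dropWhile_head_false s c tail hdw
        simpa using this
      subst hc
      set head := s.takeWhile (fun c => decide (c ≠ ',')) with hh
      have hs : s = head ++ ',' :: tail := by rw [← hdecomp, hdw]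
      have hnoc : ∀ c ∈ head, c ≠ ',' := by
        intro x hx
        have := List.mem_takeWhile_imp (l := s) (p := fun c => decide (c ≠ ',')) hx
        simpa using this
      rw [hs, mySplit_split head tail hnoc]
      simp only [chunksFrom]
      cases hmt : mySplit tail with
      | nil => exact absurd hmt (mySplit_ne_nil tail)
      | cons q qs =>
        have hchunks_ne : chunksFrom r (q :: qs) ((0 : Int) + (head.length : Int)) ≠ [] := by
          simp [chunksFrom]
        rw [show ((0 : Int) + (head.length : Int)) = ((head.length + 0 : Nat) : Int) by push_cast; ring] at *
        cases hcf : chunksFrom r (q :: qs) ((head.length + 0 : Nat) : Int) with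
        | nil => exact absurd hcf hchunks_ne
        | cons z zs =>
          rw [PySem.Chars.join_cons_cons]
          rw [← hcf]
          rw [chunksFrom_drop r head.length (q :: qs) 0]
          have htail : tail.length ≤ n := by
            have : s.length = head.length + 1 + tail.length := by rw [hs]; simp; omega
            omega
          rw [← hmt, Nat.cast_zero, ih tail (r.drop head.length) htail]
          rw [PySem.List.slice_from_natCast]
          simp

-- ===== VERDICT (by name: the statement is the Claim_ definition above) =====
theorem make_stream_replacements_spec : Claim_equal_make_stream_replacements := by
  unfold Claim_equal_make_stream_replacements
  intro stream replacement _
  unfold Spec_make_stream_replacements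
  unfold make_stream_replacements make_stream_replacements_alt
  simp only []
  congr 1
  rw [splitOn_comma, foldA]
  simp only [List.nil_append]
  rw [show ("\n,\n".toList) = ('\n' :: ',' :: '\n' :: []) from rfl]
  exact main_bridge stream.toList.length stream.toList replacement.toList le_rfl
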